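-- pv_equiv track=rewrite | github.com/yu6853/SleepLLM | Sleep2.0/utils/preprocess.py | _get_apnea_count
-- ===== SOURCE A (Python) =====
-- min_apnea_interval = 2  # 呼吸暂停的最小间隔时间为2秒
--
-- def _get_apnea_count(data):
--     apnea = [row[0] == 3 for row in data]  # 假设状态3表示呼吸暂停
--     apnea_count = 0  # 呼吸暂停次数
--     last_apnea_time = -min_apnea_interval  # 用于存储上一次呼吸暂停的时间，初始化为一个负值
--
--     # 遍历每一秒的数据
--     for i in range(len(apnea)):
--         if apnea[i]:  # 当前秒是呼吸暂停状态
--             # 如果当前呼吸暂停和上一次呼吸暂停的间隔大于等于2秒，则计为新的呼吸暂停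
--             if i - last_apnea_time >= min_apnea_interval:
--                 apnea_count += 1
--             # 更新上一次呼吸暂停的时间
--             last_apnea_time = i
--     return apnea_count
-- ===== SOURCE B (Python) =====
-- min_apnea_interval = 2  # kept from the original module
--
--
-- def _get_apnea_count(data):
--     # Count maximal contiguous runs of apnea (state 3) by counting rising edges.
--     apnea = [row[0] == 3 for row in data]
--     return sum(1 for prev, cur in zip([False] + apnea, apnea) if cur and not prev)
-- ===== Notes on version B (the rewrite author's own statement) =====
-- stated objective: simpler
-- what changed: B drops the last_apnea_time/interval state machine and counts rising edges (False->True transitions, with a virtual False before index 0) of the apnea boolean sequence, which with the pinned interval of 2 is exactly the number of maximal apnea runs.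
import Mathlib
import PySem

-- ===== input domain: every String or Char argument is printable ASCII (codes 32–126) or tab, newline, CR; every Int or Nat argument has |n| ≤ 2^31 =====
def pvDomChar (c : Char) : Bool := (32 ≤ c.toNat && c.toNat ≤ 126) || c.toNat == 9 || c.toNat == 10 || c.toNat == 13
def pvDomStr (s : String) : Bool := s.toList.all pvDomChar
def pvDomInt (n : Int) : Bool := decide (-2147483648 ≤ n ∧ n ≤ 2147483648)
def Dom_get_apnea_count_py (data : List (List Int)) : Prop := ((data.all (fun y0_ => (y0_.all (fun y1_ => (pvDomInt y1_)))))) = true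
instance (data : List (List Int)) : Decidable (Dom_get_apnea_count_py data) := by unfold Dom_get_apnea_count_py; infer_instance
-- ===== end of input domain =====

-- B replaces A's last_apnea_time/interval state machine by counting rising edges of the
-- apnea boolean sequence (with the module's interval pinned at 2 these coincide); same O(n) cost.

-- ===== PORT A =====
-- row[0] is ported as pyGetD row 0 0; Pre_ excludes the empty rows where Python raises IndexError
def get_apnea_count_py (data : List (List Int)) : Int :=
  let apnea := data.map (fun row => decide (PySem.List.pyGetD row 0 0 = 3))
  let st := (PySem.List.enumerate apnea 0).foldl
    (fun (st : Int × Int) p =>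
      if p.2 then
        (if p.1 - st.2 ≥ 2 then st.1 + 1 else st.1, p.1)
      else st) (0, -2)
  st.1

-- ===== PORT B =====
def get_apnea_count_py_alt (data : List (List Int)) : Int :=
  let apnea := data.map (fun row => decide (PySem.List.pyGetD row 0 0 = 3))
  (((false :: apnea).zip apnea).filter (fun p => p.2 && !p.1)).length

-- ===== PRECONDITION & SPEC =====
-- Pre_ excludes exactly the inputs with an empty row, on which Python A raises IndexError at row[0]
def Pre_get_apnea_count_py (data : List (List Int)) : Prop := ∀ row ∈ data, row ≠ []
instance (data : List (List Int)) : Decidable (Pre_get_apnea_count_py data) := by unfold Pre_get_apnea_count_py; infer_instance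
def pvWitness_get_apnea_count_py : List (List Int) := [[3], [3], [0], [3]]

def Spec_get_apnea_count_py (data : List (List Int)) (out : Int) : Prop := out = get_apnea_count_py_alt data
instance (data : List (List Int)) (out : Int) : Decidable (Spec_get_apnea_count_py data out) := by unfold Spec_get_apnea_count_py; infer_instance

-- ===== CLAIM (what is proved, stated in full; the proofs are below) =====
def Claim_equal_get_apnea_count_py : Prop := ∀ (data : List (List Int)), Dom_get_apnea_count_py data → Pre_get_apnea_count_py data → Spec_get_apnea_count_py data (get_apnea_count_py data)

-- ===== LEMMAS AND PROOFS =====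

-- number of rising edges of l given the previous boolean
def pvEdges : Bool → List Bool → Nat
  | _, [] => 0
  | prev, b :: t => (if b && !prev then 1 else 0) + pvEdges b t

lemma pvZipFilter_eq_edges (prev : Bool) (l : List Bool) :
    (((prev :: l).zip l).filter (fun p => p.2 && !p.1)).length = pvEdges prev l := by
  induction l generalizing prev with
  | nil => simp [pvEdges]
  | cons b t ih =>
    simp only [List.zip_cons_cons, List.filter_cons, pvEdges]
    cases b <;> cases prev <;> simp [ih, Nat.add_comm]

lemma pvLoopA (l : List Bool) (s : Int) (c last : Int) (prev : Bool)
    (h : if prev then last = s - 1 else last ≤ s - 2) :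
    ((PySem.List.enumerate l s).foldl
      (fun (st : Int × Int) p =>
        if p.2 then
          (if p.1 - st.2 ≥ 2 then st.1 + 1 else st.1, p.1)
        else st) (c, last)).1 = c + (pvEdges prev l : Int) := by
  induction l generalizing s c last prev with
  | nil => simp [PySem.List.enumerate_nil, pvEdges]
  | cons b t ih =>
    rw [PySem.List.enumerate_cons]
    simp only [List.foldl_cons]
    cases b with
    | false =>
      simp only [Bool.false_eq_true, if_false]
      have hlast : (if (false : Bool) then last = s + 1 - 1 else last ≤ s + 1 - 2) := by
        split at h <;> simp_all <;> omega
      rw [ih (s + 1) c last false hlast]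
      simp [pvEdges]
    | true =>
      simp only [if_true]
      cases prev with
      | true =>
        simp only [if_true] at h
        rw [if_neg (by simp; omega)]
        rw [ih (s + 1) c s true (by simp)]
        simp [pvEdges]
      | false =>
        simp only [Bool.false_eq_true, if_false] at h
        rw [if_pos (by omega)]
        rw [ih (s + 1) (c + 1) s true (by simp)]
        simp [pvEdges]
        omega

-- ===== VERDICT (by name: the statement is the Claim_ definition above) =====
theorem get_apnea_count_py_spec : Claim_equal_get_apnea_count_py := by
  intro data _ _
  unfold Spec_get_apnea_count_py get_apnea_count_py get_apnea_count_py_alt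
  rw [pvLoopA _ 0 0 (-2) false (by norm_num)]
  simp only [pvZipFilter_eq_edges]
  omega
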